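-- pv_equiv track=rewrite | github.com/MarshallKrakauer/WordleBot | WordleSolver.py | get_word_value
-- ===== SOURCE A (Python) =====
-- def get_word_value(word, letter_dict):
--     value = 0
--     last_letter = '_'
--     for letter in sorted(word):
--         if letter != last_letter:
--             value += letter_dict[letter]
--             last_letter = letter
--     return value
-- ===== SOURCE B (Python) =====
-- def get_word_value(word, letter_dict):
--     def go(letters, prev):
--         if not letters:
--             return 0
--         first = letters[0]
--         rest = [c for c in letters if c != first]
--         if first == prev:
--             return go(rest, prev)
--         return letter_dict[first] + go(rest, first)
--     return go(sorted(word), '_')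
-- ===== Notes on version B (the rewrite author's own statement) =====
-- stated objective: alternative
-- what changed: Replaces the imperative adjacent-skip scan (accumulator + last_letter state variable) by a recursive decomposition that removes each letter's whole run by filtering and recurses on the remainder, scoring one letter per recursive step.
import Mathlib
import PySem

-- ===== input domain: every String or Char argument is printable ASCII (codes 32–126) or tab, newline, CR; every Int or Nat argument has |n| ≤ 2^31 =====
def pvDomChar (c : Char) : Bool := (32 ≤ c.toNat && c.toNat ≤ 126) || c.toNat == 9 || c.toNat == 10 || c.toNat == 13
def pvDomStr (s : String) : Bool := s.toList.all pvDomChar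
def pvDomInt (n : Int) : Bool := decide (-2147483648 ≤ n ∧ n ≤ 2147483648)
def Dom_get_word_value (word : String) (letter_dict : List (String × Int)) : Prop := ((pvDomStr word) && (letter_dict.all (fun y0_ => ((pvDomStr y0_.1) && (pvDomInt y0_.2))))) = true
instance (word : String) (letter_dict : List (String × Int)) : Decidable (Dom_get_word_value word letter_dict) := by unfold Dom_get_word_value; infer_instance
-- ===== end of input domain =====

set_option maxRecDepth 8000

-- B replaces A's adjacent-skip scan with loop state by a recursive run-removal over the sorted
-- letters (alternative decomposition, same cost); both raise KeyError on the same inputs (Pre_).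


-- ===== PORT A =====
-- value = 0; last_letter = '_'; for letter in sorted(word): if letter != last_letter:
--   value += letter_dict[letter]; last_letter = letter   (missing key = KeyError, excluded by Pre_)
def get_word_value (word : String) (letter_dict : List (String × Int)) : Int :=
  ((PySem.List.sorted word.toList (fun c => c) false).foldl
    (fun (st : Int × Char) letter =>
      if letter ≠ st.2
      then (st.1 + ((PySem.Dict.mk letter_dict).get? (String.ofList [letter])).getD 0, letter)
      else st)
    (0, '_')).1

-- ===== PORT B =====
-- def go(letters, prev): if not letters: return 0
--   first = letters[0]; rest = [c for c in letters if c != first]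
--   if first == prev: return go(rest, prev)
--   return letter_dict[first] + go(rest, first)
-- (the head never passes its own filter, so filtering letters = filtering letters[1:])
def gwvGo (letter_dict : List (String × Int)) : List Char → Char → Int
  | [], _ => 0
  | first :: tl, prev =>
    let rest := tl.filter (fun c => c ≠ first)
    if first == prev then gwvGo letter_dict rest prev
    else ((PySem.Dict.mk letter_dict).get? (String.ofList [first])).getD 0
          + gwvGo letter_dict rest first
termination_by letters => letters.length
decreasing_by all_goals
  simp only [List.length_unattach]
  exact Nat.lt_succ_of_le (le_trans (List.length_filter_le _ _) (by simp))

-- return go(sorted(word), '_')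
def get_word_value_alt (word : String) (letter_dict : List (String × Int)) : Int :=
  gwvGo letter_dict (PySem.List.sorted word.toList (fun c => c) false) '_'

-- ===== PRECONDITION & SPEC =====
-- Pre_ excludes exactly the inputs on which the Python raises KeyError: some letter of the word
-- is missing from letter_dict and is actually looked up (a '_' that sorts before every other
-- letter is skipped and needs no entry). A and B raise on exactly the same inputs.
def Pre_get_word_value (word : String) (letter_dict : List (String × Int)) : Prop :=
  (word.toList.all (fun c =>
    (letter_dict.map Prod.fst).contains (String.ofList [c])
      || (c == '_' && word.toList.all (fun d => decide ('_' ≤ d))))) = true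
instance (word : String) (letter_dict : List (String × Int)) : Decidable (Pre_get_word_value word letter_dict) := by unfold Pre_get_word_value; infer_instance
def pvWitness_get_word_value : String × (List (String × Int)) := ("ab", [("a", 1), ("b", 2)])

def Spec_get_word_value (word : String) (letter_dict : List (String × Int)) (out : Int) : Prop := out = get_word_value_alt word letter_dict
instance (word : String) (letter_dict : List (String × Int)) (out : Int) : Decidable (Spec_get_word_value word letter_dict out) := by unfold Spec_get_word_value; infer_instance

-- ===== CLAIM (what is proved, stated in full; the proofs are below) =====
def Claim_equal_get_word_value : Prop := ∀ (word : String) (letter_dict : List (String × Int)), Dom_get_word_value word letter_dict → Pre_get_word_value word letter_dict → Spec_get_word_value word letter_dict (get_word_value word letter_dict)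

-- ===== LEMMAS AND PROOFS =====

-- On a sorted list, the head is any member that is ≤ all elements.
theorem pvHead_eq (c : Char) (cs : List Char) (h1 : ∀ x ∈ cs, c ≤ x)
    (h2 : cs.Pairwise (· ≤ ·)) (hm : c ∈ cs) : cs.head? = some c := by
  cases cs with
  | nil => cases hm
  | cons h t =>
    simp only [List.head?_cons, Option.some.injEq]
    rcases List.mem_cons.mp hm with rfl | hmem
    · rfl
    · exact le_antisymm ((List.pairwise_cons.mp h2).1 c hmem) (h1 h (List.mem_cons_self))

theorem pvFoldA (f : Char → Int) (l : List Char) (acc : Int) (last : Char)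
    (hs : l.Pairwise (· ≤ ·)) :
    (l.foldl (fun (st : Int × Char) c => if c ≠ st.2 then (st.1 + f c, c) else st) (acc, last)).1
      = acc + (∑ x ∈ l.toFinset, f x) - (if l.head? = some last then f last else 0) := by
  induction l generalizing acc last with
  | nil => simp
  | cons c cs ih =>
    obtain ⟨h1, h2⟩ := List.pairwise_cons.mp hs
    have step : ∀ a : Int, (List.foldl (fun (st : Int × Char) c => if c ≠ st.2 then (st.1 + f c, c) else st) (a, c) cs).1
        = a + (∑ x ∈ cs.toFinset, f x) - (if cs.head? = some c then f c else 0) := fun a => ih a c h2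
    by_cases hm : c ∈ cs
    · have hhead : cs.head? = some c := pvHead_eq c cs h1 h2 hm
      have hins : (c :: cs).toFinset = cs.toFinset := by
        simp [List.toFinset_cons, Finset.insert_eq_self.mpr (List.mem_toFinset.mpr hm)]
      by_cases hc : c = last
      · subst hc
        rw [List.foldl_cons, if_neg (fun h => h rfl), step, hhead, hins]
        simp
      · rw [List.foldl_cons, if_pos (by simpa using hc), step, hhead, hins]
        simp only [List.head?_cons, Option.some.injEq, hc, if_false, ite_true]
        ring
    · have hhead : cs.head? ≠ some c := by
        cases cs with
        | nil => simp
        | cons h t =>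
          simp only [List.head?_cons]
          intro h'; exact hm (List.mem_cons.mpr (Or.inl (Option.some.inj h').symm))
      have hins : ∑ x ∈ (c :: cs).toFinset, f x = f c + ∑ x ∈ cs.toFinset, f x := by
        rw [List.toFinset_cons, Finset.sum_insert (by simpa using hm)]
      by_cases hc : c = last
      · subst hc
        rw [List.foldl_cons, if_neg (fun h => h rfl), step, if_neg hhead, hins]
        simp only [List.head?_cons, ite_true]
        ring
      · rw [List.foldl_cons, if_pos (by simpa using hc), step, if_neg hhead, hins]
        simp only [List.head?_cons, Option.some.injEq, hc, if_false]
        ring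

-- Characterisation of port A.
theorem pvA_char (word : String) (ld : List (String × Int)) :
    get_word_value word ld
      = (∑ x ∈ word.toList.toFinset, ((PySem.Dict.mk ld).get? (String.ofList [x])).getD 0)
        - (if (PySem.List.sorted word.toList (fun c => c) false).head? = some '_'
           then ((PySem.Dict.mk ld).get? (String.ofList ['_'])).getD 0 else 0) := by
  unfold get_word_value
  rw [pvFoldA (fun c => ((PySem.Dict.mk ld).get? (String.ofList [c])).getD 0)
      (PySem.List.sorted word.toList (fun c => c) false) 0 '_'
      (by simpa using PySem.List.sorted_pairwise word.toList (fun c => c)),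
    List.toFinset_eq_of_perm _ _ (PySem.List.sorted_perm word.toList (fun c => c) false)]
  ring

-- gwvGo satisfies the same closed form, on ANY letter list (sortedness not needed: the
-- whole run of the head is filtered away, so the recursive head is never the previous letter).
theorem pvGo_aux (ld : List (String × Int)) (n : Nat) :
    ∀ (l : List Char), l.length ≤ n → ∀ (prev : Char),
    gwvGo ld l prev
      = (∑ x ∈ l.toFinset, ((PySem.Dict.mk ld).get? (String.ofList [x])).getD 0)
        - (if l.head? = some prev
           then ((PySem.Dict.mk ld).get? (String.ofList [prev])).getD 0 else 0) := by
  induction n with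
  | zero =>
    intro l hl prev
    rw [List.length_eq_zero_iff.mp (Nat.le_zero.mp hl)]
    simp [gwvGo]
  | succ n ih =>
    intro l hl prev
    cases l with
    | nil => simp [gwvGo]
    | cons first tl =>
      have hrlen : (tl.filter (fun c => c ≠ first)).length ≤ n :=
        le_trans (List.length_filter_le _ _) (Nat.le_of_succ_le_succ hl)
      have hrest : ∀ q : Char, (tl.filter (fun c => c ≠ first)).head? ≠ some first := by
        intro q hr
        have hm : first ∈ tl.filter (fun c => c ≠ first) := List.mem_of_mem_head? hr
        have := List.of_mem_filter hm
        simp at this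
      have hfin : (tl.filter (fun c => c ≠ first)).toFinset
          = (first :: tl).toFinset.erase first := by
        apply Finset.ext; intro a
        simp only [List.mem_toFinset, Finset.mem_erase, List.mem_filter, List.toFinset_cons,
          Finset.mem_insert, decide_eq_true_eq]
        constructor
        · rintro ⟨ha, hne⟩; exact ⟨hne, Or.inr ha⟩
        · rintro ⟨hne, ha | ha⟩
          · exact absurd ha hne
          · exact ⟨ha, hne⟩
      have hsum : ∑ x ∈ (tl.filter (fun c => c ≠ first)).toFinset,
            ((PySem.Dict.mk ld).get? (String.ofList [x])).getD 0
          = (∑ x ∈ (first :: tl).toFinset, ((PySem.Dict.mk ld).get? (String.ofList [x])).getD 0)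
            - ((PySem.Dict.mk ld).get? (String.ofList [first])).getD 0 := by
        rw [hfin, Finset.sum_erase_eq_sub (by simp)]
      by_cases hfp : first = prev
      · subst hfp
        rw [gwvGo, if_pos (by simp)]
        rw [ih _ hrlen, hsum, if_neg (hrest first)]
        simp only [List.head?_cons, ite_true]
        ring
      · rw [gwvGo, if_neg (by simpa using hfp)]
        rw [ih _ hrlen, hsum, if_neg (hrest first)]
        simp only [List.head?_cons, Option.some.injEq, hfp, if_false]
        ring

theorem pvGo_char (ld : List (String × Int)) (l : List Char) (prev : Char) :
    gwvGo ld l prev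
      = (∑ x ∈ l.toFinset, ((PySem.Dict.mk ld).get? (String.ofList [x])).getD 0)
        - (if l.head? = some prev
           then ((PySem.Dict.mk ld).get? (String.ofList [prev])).getD 0 else 0) :=
  pvGo_aux ld l.length l (le_refl _) prev

-- Characterisation of port B: same closed form as port A.
theorem pvB_char (word : String) (ld : List (String × Int)) :
    get_word_value_alt word ld
      = (∑ x ∈ word.toList.toFinset, ((PySem.Dict.mk ld).get? (String.ofList [x])).getD 0)
        - (if (PySem.List.sorted word.toList (fun c => c) false).head? = some '_'
           then ((PySem.Dict.mk ld).get? (String.ofList ['_'])).getD 0 else 0) := by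
  unfold get_word_value_alt
  rw [pvGo_char, List.toFinset_eq_of_perm _ _ (PySem.List.sorted_perm word.toList (fun c => c) false)]

-- ===== VERDICT (by name: the statement is the Claim_ definition above) =====
theorem get_word_value_spec : Claim_equal_get_word_value := by
  intro word ld _ _
  unfold Spec_get_word_value
  rw [pvA_char, pvB_char]
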